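-- pv_equiv track=rewrite | github.com/sujanmaharjan99/LRF_RC | Extractor_from_Fari_csv.py | _resolve_cols
-- ===== SOURCE A (Python) =====
-- def _resolve_cols(cols):
--     norm = {c.strip().lower(): c for c in cols}
--     # try common variants
--     fid_key = None
--     for cand in ("feature_id", "featureid", "station_id", "stationid"):
--         if cand in norm:
--             fid_key = norm[cand]
--             break
--     flow_key = None
--     for cand in ("streamflow", "flow", "discharge", "q_out", "qout"):
--         if cand in norm:
--             flow_key = norm[cand]
--             break
--     return fid_key, flow_key
-- ===== SOURCE B (Python) =====
-- def _resolve_cols(cols):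
--     fid_rank = {"feature_id": 0, "featureid": 1, "station_id": 2, "stationid": 3}
--     flow_rank = {"streamflow": 0, "flow": 1, "discharge": 2, "q_out": 3, "qout": 4}
--     best_fid = None   # (rank, column)
--     best_flow = None
--     for c in cols:
--         n = c.strip().lower()
--         r = fid_rank.get(n)
--         if r is not None and (best_fid is None or r <= best_fid[0]):
--             best_fid = (r, c)
--         r = flow_rank.get(n)
--         if r is not None and (best_flow is None or r <= best_flow[0]):
--             best_flow = (r, c)
--     return (best_fid[1] if best_fid is not None else None,
--             best_flow[1] if best_flow is not None else None)
-- ===== Notes on version B (the rewrite author's own statement) =====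
-- stated objective: alternative
-- what changed: Instead of building a normalized-name->column dict and then scanning each candidate tuple against it, B makes one pass over the columns tracking the best (lowest-priority-rank, last-wins) match per field via two candidate->rank tables.
import Mathlib
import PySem

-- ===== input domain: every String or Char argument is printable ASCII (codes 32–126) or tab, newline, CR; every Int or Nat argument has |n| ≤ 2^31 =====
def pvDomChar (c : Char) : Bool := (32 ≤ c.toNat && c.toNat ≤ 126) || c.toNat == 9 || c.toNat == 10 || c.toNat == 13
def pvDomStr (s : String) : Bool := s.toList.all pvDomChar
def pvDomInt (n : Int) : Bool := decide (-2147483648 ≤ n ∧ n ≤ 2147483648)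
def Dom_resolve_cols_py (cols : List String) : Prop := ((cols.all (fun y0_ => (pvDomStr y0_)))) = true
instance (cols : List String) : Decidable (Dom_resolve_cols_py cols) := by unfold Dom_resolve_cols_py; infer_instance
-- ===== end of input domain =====

-- B replaces A's build-a-dict-then-scan-candidates decomposition by a single pass over the
-- columns maintaining the best (lowest-priority-rank, last-wins) match per field; alternative, same cost.

-- ===== PORT A =====
-- c.strip().lower(), shared normalisation used by both Pythons
def pvNormKey (c : String) : String := PySem.Str.lower (PySem.Str.strip c)

-- the 'for cand in (…): if cand in norm: key = norm[cand]; break' loop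
def pvFirstCand (norm : PySem.Dict String String) : List String → Option String
  | [] => none
  | cand :: rest =>
    if norm.contains cand then norm.get? cand
    else pvFirstCand norm rest

def resolve_cols_py (cols : List String) : Option String × Option String :=
  let norm : PySem.Dict String String :=
    cols.foldl (fun d c => d.insert (pvNormKey c) c) PySem.Dict.empty
  (pvFirstCand norm ["feature_id", "featureid", "station_id", "stationid"],
   pvFirstCand norm ["streamflow", "flow", "discharge", "q_out", "qout"])

-- ===== PORT B =====
def pvFidRank : PySem.Dict String Int :=
  PySem.Dict.ofList [("feature_id", 0), ("featureid", 1), ("station_id", 2), ("stationid", 3)]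
def pvFlowRank : PySem.Dict String Int :=
  PySem.Dict.ofList [("streamflow", 0), ("flow", 1), ("discharge", 2), ("q_out", 3), ("qout", 4)]

-- 'r = rank.get(n); if r is not None and (best is None or r <= best[0]): best = (r, c)'
def pvUpd (rank : PySem.Dict String Int) (n c : String)
    (best : Option (Int × String)) : Option (Int × String) :=
  match rank.get? n with
  | none => best
  | some r =>
    match best with
    | none => some (r, c)
    | some (br, bc) => if r ≤ br then some (r, c) else some (br, bc)

def resolve_cols_py_alt (cols : List String) : Option String × Option String :=
  let st := cols.foldl
    (fun (st : Option (Int × String) × Option (Int × String)) c =>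
      let n := pvNormKey c
      (pvUpd pvFidRank n c st.1, pvUpd pvFlowRank n c st.2))
    (none, none)
  (st.1.map (·.2), st.2.map (·.2))

-- ===== PRECONDITION & SPEC =====
def Spec_resolve_cols_py (cols : List String) (out : Option String × Option String) : Prop := out = resolve_cols_py_alt cols
instance (cols : List String) (out : Option String × Option String) : Decidable (Spec_resolve_cols_py cols out) := by unfold Spec_resolve_cols_py; infer_instance

-- ===== CLAIM (what is proved, stated in full; the proofs are below) =====
def Claim_equal_resolve_cols_py : Prop := ∀ (cols : List String), Dom_resolve_cols_py cols → Spec_resolve_cols_py cols (resolve_cols_py cols)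

-- ===== LEMMAS AND PROOFS =====

-- first candidate present in norm, together with its priority index
def pvFirstCandI (norm : PySem.Dict String String) : List String → Option (Int × String)
  | [] => none
  | cand :: rest =>
    match norm.get? cand with
    | some v => some (0, v)
    | none => (pvFirstCandI norm rest).map (fun p => (p.1 + 1, p.2))

-- priority index of a key in a candidate list
def pvCandIdx : List String → String → Option Int
  | [], _ => none
  | cand :: rest, n => if n = cand then some 0 else (pvCandIdx rest n).map (· + 1)

def pvUpdIdx (cands : List String) (k v : String)
    (best : Option (Int × String)) : Option (Int × String) :=
  match pvCandIdx cands k with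
  | none => best
  | some r =>
    match best with
    | none => some (r, v)
    | some (br, bc) => if r ≤ br then some (r, v) else some (br, bc)

lemma pvFirstCandI_nonneg (d : PySem.Dict String String) (cs : List String)
    (br : Int) (w : String) (h : pvFirstCandI d cs = some (br, w)) : 0 ≤ br := by
  induction cs generalizing br w with
  | nil => simp [pvFirstCandI] at h
  | cons c rest ih =>
    simp only [pvFirstCandI] at h
    cases hg : d.get? c with
    | some v => rw [hg] at h; simp at h; omega
    | none =>
      rw [hg] at h
      cases hr : pvFirstCandI d rest with
      | none => rw [hr] at h; simp at h
      | some p =>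
        rw [hr] at h; simp at h
        have := ih p.1 p.2 (by rw [hr])
        omega

lemma pvCandIdx_nonneg (cs : List String) (n : String) (r : Int)
    (h : pvCandIdx cs n = some r) : 0 ≤ r := by
  induction cs generalizing r with
  | nil => simp [pvCandIdx] at h
  | cons c rest ih =>
    simp only [pvCandIdx] at h
    split at h
    · simp at h; omega
    · cases hr : pvCandIdx rest n with
      | none => rw [hr] at h; simp at h
      | some r' =>
        rw [hr] at h; simp at h
        have := ih r' hr
        omega

lemma pvFirstCand_eq_map (d : PySem.Dict String String) (cs : List String) :
    pvFirstCand d cs = (pvFirstCandI d cs).map (·.2) := by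
  induction cs with
  | nil => rfl
  | cons c rest ih =>
    simp only [pvFirstCand, pvFirstCandI]
    cases hg : d.get? c with
    | some v =>
      have hc : d.contains c = true := by
        by_contra hcon
        have : d.get? c = none := by
          rw [PySem.Dict.get?_eq_none_iff_contains]
          simpa using hcon
        simp [this] at hg
      simp [hc]
    | none =>
      have hc : d.contains c = false := by
        rw [← PySem.Dict.get?_eq_none_iff_contains]; exact hg
      simp [hc, ih]
      cases pvFirstCandI d rest <;> simp

-- inserting (k ↦ v) updates the first-present-candidate pair exactly as B's step does
lemma pvFirstCandI_insert (cs : List String) (d : PySem.Dict String String) (k v : String) :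
    pvFirstCandI (d.insert k v) cs = pvUpdIdx cs k v (pvFirstCandI d cs) := by
  induction cs generalizing d with
  | nil => rfl
  | cons c rest ih =>
    by_cases hk : c = k
    · subst hk
      simp only [pvFirstCandI, pvUpdIdx, pvCandIdx, PySem.Dict.get?_insert_self]
      cases hg : d.get? c with
      | some v0 => simp
      | none =>
        cases hr : pvFirstCandI d rest with
        | none => simp
        | some p =>
          obtain ⟨br, w⟩ := p
          have h0 : (0 : Int) ≤ br := pvFirstCandI_nonneg d rest br w hr
          simp [if_pos (by omega : (0:Int) ≤ br + 1)]
    · have hne : c ≠ k := hk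
      simp only [pvFirstCandI, pvUpdIdx, pvCandIdx,
        PySem.Dict.get?_insert_of_ne d v hne, if_neg (Ne.symm hne)]
      cases hg : d.get? c with
      | some v0 =>
        -- head already matched in d; B's update never displaces rank 0 by a deeper rank
        cases hi : pvCandIdx rest k with
        | none => simp
        | some r' =>
          have h0 : (0 : Int) ≤ r' := pvCandIdx_nonneg rest k r' hi
          simp
          intro hlt
          exact absurd hlt (by omega)
      | none =>
        rw [ih d]
        -- shift-by-one commutes with the update
        simp only [pvUpdIdx]
        cases hi : pvCandIdx rest k with
        | none => simp
        | some r' =>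
          cases hr : pvFirstCandI d rest with
          | none => simp
          | some p =>
            obtain ⟨br, w⟩ := p
            simp only [Option.map_some]
            by_cases hle : r' ≤ br
            · simp [if_pos hle]
            · simp [if_neg hle]

lemma pvUpd_eq_updIdx_fid (n c : String) (best : Option (Int × String)) :
    pvUpd pvFidRank n c best =
      pvUpdIdx ["feature_id", "featureid", "station_id", "stationid"] n c best := by
  have h : pvFidRank.get? n =
      pvCandIdx ["feature_id", "featureid", "station_id", "stationid"] n := by
    by_cases h1 : n = "feature_id"
    · subst h1; decide
    by_cases h2 : n = "featureid"
    · subst h2; decide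
    by_cases h3 : n = "station_id"
    · subst h3; decide
    by_cases h4 : n = "stationid"
    · subst h4; decide
    · simp [pvFidRank, pvCandIdx, PySem.Dict.ofList, PySem.Dict.update, PySem.Dict.insert,
        PySem.Dict.empty, PySem.Dict.get?, h1, h2, h3, h4,
        Ne.symm h1, Ne.symm h2, Ne.symm h3, Ne.symm h4]
  simp only [pvUpd, pvUpdIdx, h]

lemma pvUpd_eq_updIdx_flow (n c : String) (best : Option (Int × String)) :
    pvUpd pvFlowRank n c best =
      pvUpdIdx ["streamflow", "flow", "discharge", "q_out", "qout"] n c best := by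
  have h : pvFlowRank.get? n =
      pvCandIdx ["streamflow", "flow", "discharge", "q_out", "qout"] n := by
    by_cases h1 : n = "streamflow"
    · subst h1; decide
    by_cases h2 : n = "flow"
    · subst h2; decide
    by_cases h3 : n = "discharge"
    · subst h3; decide
    by_cases h4 : n = "q_out"
    · subst h4; decide
    by_cases h5 : n = "qout"
    · subst h5; decide
    · simp [pvFlowRank, pvCandIdx, PySem.Dict.ofList, PySem.Dict.update, PySem.Dict.insert,
        PySem.Dict.empty, PySem.Dict.get?, h1, h2, h3, h4, h5,
        Ne.symm h1, Ne.symm h2, Ne.symm h3, Ne.symm h4, Ne.symm h5]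
  simp only [pvUpd, pvUpdIdx, h]

lemma pvMain (cols : List String) (d : PySem.Dict String String)
    (stF stFl : Option (Int × String))
    (hF : stF = pvFirstCandI d ["feature_id", "featureid", "station_id", "stationid"])
    (hFl : stFl = pvFirstCandI d ["streamflow", "flow", "discharge", "q_out", "qout"]) :
    cols.foldl
      (fun (st : Option (Int × String) × Option (Int × String)) c =>
        let n := pvNormKey c
        (pvUpd pvFidRank n c st.1, pvUpd pvFlowRank n c st.2))
      (stF, stFl) =
    (pvFirstCandI (cols.foldl (fun d c => d.insert (pvNormKey c) c) d)
        ["feature_id", "featureid", "station_id", "stationid"],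
     pvFirstCandI (cols.foldl (fun d c => d.insert (pvNormKey c) c) d)
        ["streamflow", "flow", "discharge", "q_out", "qout"]) := by
  induction cols generalizing d stF stFl with
  | nil => simp [hF, hFl]
  | cons c rest ih =>
    simp only [List.foldl_cons]
    exact ih (d.insert (pvNormKey c) c) _ _
      (by rw [hF, pvUpd_eq_updIdx_fid, pvFirstCandI_insert])
      (by rw [hFl, pvUpd_eq_updIdx_flow, pvFirstCandI_insert])

-- ===== VERDICT (by name: the statement is the Claim_ definition above) =====
theorem resolve_cols_py_spec : Claim_equal_resolve_cols_py := by
  intro cols _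
  unfold Spec_resolve_cols_py resolve_cols_py resolve_cols_py_alt
  rw [pvMain cols PySem.Dict.empty none none rfl rfl]
  simp [pvFirstCand_eq_map]
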